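-- pv_equiv track=rewrite | github.com/saridha11/python | common divisior pro.py | countCommonBases
-- ===== SOURCE A (Python) =====
-- def isCommonBase(base, s1, s2):
--     for j in range(len(s1)):
--         if (base[j % len(base)] != s1[j]):
--             return False
--     for j in range(len(s2)):
--         if (base[j % len( base)] != s2[j]):
--             return False
--
--     return True
--
-- def countCommonBases(s1, s2):
--     n1 = len(s1)
--     n2 = len(s2)
--     count = 0
--     for i in range(1, min(n1, n2) + 1):
--         base = s1[0: i]
--         if (isCommonBase(base, s1, s2)):
--             count += 1
--
--     return count
-- ===== SOURCE B (Python) =====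
-- def countCommonBases(s1, s2):
--     n1, n2 = len(s1), len(s2)
--     # longest common prefix of s1 and s2
--     l = 0
--     while l < min(n1, n2) and s1[l] == s2[l]:
--         l += 1
--     # p qualifies iff p <= lcp and p is a period of both strings
--     # (s tiles with its p-prefix iff s shifted by p matches itself)
--     return sum(1 for p in range(1, l + 1)
--                if s1[p:] == s1[:n1 - p] and s2[p:] == s2[:n2 - p])
-- ===== Notes on version B (the rewrite author's own statement) =====
-- stated objective: faster
-- what changed: A tests each candidate prefix length by re-scanning both whole strings with modular indexing into the prefix; B computes the longest common prefix once, loops only up to it, and tests each length with one shift-overlap slice equality per string (s[p:] == s[:n-p]).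
import Mathlib
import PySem

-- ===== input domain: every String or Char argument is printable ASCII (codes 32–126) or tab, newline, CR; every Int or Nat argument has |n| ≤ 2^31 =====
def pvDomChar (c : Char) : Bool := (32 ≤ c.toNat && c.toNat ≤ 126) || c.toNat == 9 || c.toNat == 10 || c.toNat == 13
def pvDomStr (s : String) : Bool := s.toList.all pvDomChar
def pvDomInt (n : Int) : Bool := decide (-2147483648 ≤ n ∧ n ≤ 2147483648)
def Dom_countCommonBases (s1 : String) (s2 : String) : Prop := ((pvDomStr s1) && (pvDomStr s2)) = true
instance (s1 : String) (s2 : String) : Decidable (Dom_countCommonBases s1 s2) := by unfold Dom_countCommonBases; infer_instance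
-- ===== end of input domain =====

-- B replaces A's per-length modular tiling scan by a longest-common-prefix bound plus a
-- shift-overlap (slice equality) period test per length; measured faster (same worst-case bound).

-- ===== PORT A =====
-- helper of A: checks that `base` tiles both strings (early-return loops → List.all);
-- every call has 0 < base.length and all indices in range, so getD is exact here
def isCommonBase (base s1 s2 : List Char) : Bool :=
  ((List.range s1.length).all fun j => base.getD (j % base.length) 'a' == s1.getD j 'a') &&
  ((List.range s2.length).all fun j => base.getD (j % base.length) 'a' == s2.getD j 'a')

def countCommonBases (s1 : String) (s2 : String) : Int :=
  let l1 := s1.toList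
  let l2 := s2.toList
  (List.range (min l1.length l2.length)).foldl
    (fun count i0 => if isCommonBase (l1.take (i0 + 1)) l1 l2 then count + 1 else count) (0 : Int)

-- ===== PORT B =====
-- B's lcp while-loop, as structural recursion
def lcpLen : List Char → List Char → Nat
  | a :: as, b :: bs => if a == b then lcpLen as bs + 1 else 0
  | _, _ => 0

-- B's period test: s[p:] == s[:n-p]
def isPeriod (p : Nat) (l : List Char) : Bool := l.drop p == l.take (l.length - p)

def countCommonBases_alt (s1 : String) (s2 : String) : Int :=
  let l1 := s1.toList
  let l2 := s2.toList
  (((List.range (lcpLen l1 l2)).filter fun p0 => isPeriod (p0 + 1) l1 && isPeriod (p0 + 1) l2).length : Int)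

-- ===== PRECONDITION & SPEC =====
def Spec_countCommonBases (s1 : String) (s2 : String) (out : Int) : Prop := out = countCommonBases_alt s1 s2
instance (s1 : String) (s2 : String) (out : Int) : Decidable (Spec_countCommonBases s1 s2 out) := by unfold Spec_countCommonBases; infer_instance

-- ===== CLAIM (what is proved, stated in full; the proofs are below) =====
def Claim_equal_countCommonBases : Prop := ∀ (s1 : String) (s2 : String), Dom_countCommonBases s1 s2 → Spec_countCommonBases s1 s2 (countCommonBases s1 s2)

-- ===== LEMMAS AND PROOFS =====

-- counting fold = length of filter
theorem foldl_count (p : Nat → Bool) (xs : List Nat) (c : Int) :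
    xs.foldl (fun c i => if p i then c + 1 else c) c = c + (xs.filter p).length := by
  induction xs generalizing c with
  | nil => simp
  | cons x xs ih =>
    simp only [List.foldl_cons, List.filter_cons]
    by_cases h : p x = true
    · simp [h, ih]; ring
    · simp [h, ih]

-- drop/take equality ↔ shift-by-p self-agreement
theorem shift_iff (l : List Char) (p : Nat) :
    (l.drop p = l.take (l.length - p)) ↔ ∀ k, k + p < l.length → l.getD (k + p) 'a' = l.getD k 'a' := by
  constructor
  · intro h k hk
    have h2 := congrArg (fun t => t[k]?) h
    simp only [List.getElem?_drop] at h2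
    rw [List.getElem?_take_of_lt (by omega)] at h2
    rw [List.getD_eq_getElem?_getD, List.getD_eq_getElem?_getD, Nat.add_comm k p, h2]
  · intro h
    apply List.ext_getElem?_iff.mpr
    intro i
    rw [List.getElem?_drop]
    by_cases hi : i < l.length - p
    · rw [List.getElem?_take_of_lt hi, Nat.add_comm p i]
      have h3 := h i (by omega)
      simp only [List.getD_eq_getElem?_getD] at h3
      rw [List.getElem?_eq_getElem (show i + p < l.length by omega),
          List.getElem?_eq_getElem (show i < l.length by omega)] at h3
      simp only [Option.getD_some] at h3
      rw [List.getElem?_eq_getElem (show i + p < l.length by omega),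
          List.getElem?_eq_getElem (show i < l.length by omega)]
      simp only [Option.some.injEq]
      exact h3
    · rw [List.getElem?_eq_none (by omega), List.getElem?_eq_none (by simp; omega)]

-- shift form ↔ modular-tiling form
theorem mod_iff (l : List Char) (p : Nat) (hp : 0 < p) :
    (∀ k, k + p < l.length → l.getD (k + p) 'a' = l.getD k 'a') ↔
      ∀ j < l.length, l.getD (j % p) 'a' = l.getD j 'a' := by
  constructor
  · intro h j
    induction j using Nat.strong_induction_on with
    | _ j ih =>
      intro hj
      by_cases hjp : j < p
      · rw [Nat.mod_eq_of_lt hjp]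
      · have hple : p ≤ j := by omega
        rw [Nat.mod_eq_sub_mod hple]
        rw [ih (j - p) (by omega) (by omega)]
        have h1 := h (j - p) (by omega)
        rw [show j - p + p = j by omega] at h1
        exact h1.symm
  · intro h k hk
    have h1 := h (k + p) hk
    have h2 := h k (by omega)
    rw [Nat.add_mod_right] at h1
    rw [← h1, ← h2]

theorem period_iff (l : List Char) (p : Nat) (hp : 0 < p) :
    isPeriod p l = true ↔ ∀ j < l.length, l.getD (j % p) 'a' = l.getD j 'a' := by
  rw [isPeriod, beq_iff_eq, shift_iff, mod_iff l p hp]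

-- characterization of lcpLen
theorem le_lcp_iff (l1 l2 : List Char) (i : Nat) :
    i ≤ lcpLen l1 l2 ↔ i ≤ l1.length ∧ i ≤ l2.length ∧ ∀ j < i, l1.getD j 'a' = l2.getD j 'a' := by
  induction l1 generalizing l2 i with
  | nil => cases i <;> simp [lcpLen]
  | cons a as ih =>
    cases l2 with
    | nil => cases i <;> simp [lcpLen]
    | cons b bs =>
      cases i with
      | zero => simp
      | succ n =>
        by_cases hab : (a == b) = true
        · have hab' : a = b := beq_iff_eq.mp hab
          simp only [lcpLen, hab, if_pos]
          constructor
          · intro h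
            have h' := (ih bs n).mp (by omega)
            refine ⟨by simpa using Nat.succ_le_succ h'.1, by simpa using Nat.succ_le_succ h'.2.1, ?_⟩
            intro j hj
            cases j with
            | zero => simpa using hab'
            | succ m => simpa using h'.2.2 m (by omega)
          · intro ⟨h1, h2, h3⟩
            have : n ≤ lcpLen as bs := (ih bs n).mpr
              ⟨by simpa using h1, by simpa using h2, fun j hj => by simpa using h3 (j + 1) (by omega)⟩
            omega
        · simp only [lcpLen, hab, if_neg, Bool.false_eq_true, not_false_iff]
          constructor
          · intro h; omega
          · intro ⟨_, _, h3⟩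
            exact absurd (by simpa using h3 0 (by omega)) (by simpa using hab)

theorem lcp_le_min (l1 l2 : List Char) : lcpLen l1 l2 ≤ min l1.length l2.length := by
  have := (le_lcp_iff l1 l2 (lcpLen l1 l2)).mp le_rfl
  omega

-- the second tiling condition of A ↔ (prefix-length bound ∧ self-period of l2)
theorem C2_iff (l1 l2 : List Char) (i : Nat) (hi : 0 < i) (h1 : i ≤ l1.length) (h2 : i ≤ l2.length) :
    (∀ j < l2.length, l1.getD (j % i) 'a' = l2.getD j 'a') ↔
      (i ≤ lcpLen l1 l2 ∧ ∀ j < l2.length, l2.getD (j % i) 'a' = l2.getD j 'a') := by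
  constructor
  · intro h
    have hpre : ∀ j < i, l1.getD j 'a' = l2.getD j 'a' := by
      intro j hj
      have := h j (by omega)
      rwa [Nat.mod_eq_of_lt hj] at this
    refine ⟨(le_lcp_iff l1 l2 i).mpr ⟨h1, h2, hpre⟩, ?_⟩
    intro j hj
    rw [← hpre (j % i) (Nat.mod_lt _ hi), h j hj]
  · intro ⟨hl, h⟩
    have hpre := ((le_lcp_iff l1 l2 i).mp hl).2.2
    intro j hj
    rw [hpre (j % i) (Nat.mod_lt _ hi), h j hj]

-- pointwise: A's test at prefix length i0+1 = (i0 < lcp) && both period tests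
theorem predA_eq (l1 l2 : List Char) (i0 : Nat) (h : i0 < min l1.length l2.length) :
    isCommonBase (l1.take (i0 + 1)) l1 l2 =
      (decide (i0 < lcpLen l1 l2) && (isPeriod (i0 + 1) l1 && isPeriod (i0 + 1) l2)) := by
  have hi1 : i0 + 1 ≤ l1.length := by omega
  have hi2 : i0 + 1 ≤ l2.length := by omega
  have hip : 0 < i0 + 1 := by omega
  have hb : (l1.take (i0 + 1)).length = i0 + 1 := by simp [List.length_take]; omega
  have hbg : ∀ k < i0 + 1, (l1.take (i0 + 1)).getD k 'a' = l1.getD k 'a' := by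
    intro k hk
    rw [List.getD_eq_getElem?_getD, List.getD_eq_getElem?_getD, List.getElem?_take_of_lt hk]
  rw [Bool.eq_iff_iff]
  simp only [isCommonBase, Bool.and_eq_true, List.all_eq_true, List.mem_range, beq_iff_eq,
    decide_eq_true_eq, hb]
  have hmod : ∀ j : Nat, (l1.take (i0 + 1)).getD (j % (i0 + 1)) 'a' = l1.getD (j % (i0 + 1)) 'a' :=
    fun j => hbg _ (Nat.mod_lt _ hip)
  constructor
  · intro ⟨hA1, hA2⟩
    have hP1 : ∀ j < l1.length, l1.getD (j % (i0 + 1)) 'a' = l1.getD j 'a' := by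
      intro j hj; rw [← hmod j]; exact hA1 j hj
    have hC2 : ∀ j < l2.length, l1.getD (j % (i0 + 1)) 'a' = l2.getD j 'a' := by
      intro j hj; rw [← hmod j]; exact hA2 j hj
    have := (C2_iff l1 l2 (i0 + 1) hip hi1 hi2).mp hC2
    exact ⟨by omega, (period_iff l1 _ hip).mpr hP1, (period_iff l2 _ hip).mpr this.2⟩
  · intro ⟨hl, hP1, hP2⟩
    have hC2 := (C2_iff l1 l2 (i0 + 1) hip hi1 hi2).mpr
      ⟨by omega, (period_iff l2 _ hip).mp hP2⟩
    exact ⟨fun j hj => by rw [hmod j]; exact (period_iff l1 _ hip).mp hP1 j hj,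
           fun j hj => by rw [hmod j]; exact hC2 j hj⟩

theorem filter_len_eq (l1 l2 : List Char) :
    ((List.range (min l1.length l2.length)).filter fun i0 => isCommonBase (l1.take (i0 + 1)) l1 l2).length
      = ((List.range (lcpLen l1 l2)).filter fun p0 => isPeriod (p0 + 1) l1 && isPeriod (p0 + 1) l2).length := by
  have hlm := lcp_le_min l1 l2
  have hsplit : min l1.length l2.length = lcpLen l1 l2 + (min l1.length l2.length - lcpLen l1 l2) := by
    omega
  rw [hsplit, List.range_add, List.filter_append, List.length_append]
  have h1 : (List.range (lcpLen l1 l2)).filter (fun i0 => isCommonBase (l1.take (i0 + 1)) l1 l2)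
      = (List.range (lcpLen l1 l2)).filter fun p0 => isPeriod (p0 + 1) l1 && isPeriod (p0 + 1) l2 := by
    apply List.filter_congr
    intro x hx
    rw [List.mem_range] at hx
    rw [predA_eq l1 l2 x (by omega), decide_eq_true (by omega), Bool.true_and]
  have h2 : ((List.range (min l1.length l2.length - lcpLen l1 l2)).map (lcpLen l1 l2 + ·)).filter
      (fun i0 => isCommonBase (l1.take (i0 + 1)) l1 l2) = [] := by
    apply List.filter_eq_nil_iff.mpr
    intro x hx
    rw [List.mem_map] at hx
    obtain ⟨y, hy, rfl⟩ := hx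
    rw [List.mem_range] at hy
    rw [predA_eq l1 l2 _ (by omega)]
    simp only [Bool.and_eq_true, decide_eq_true_eq, not_and]
    intro hlt
    omega
  rw [h1, h2]
  simp

-- ===== VERDICT (by name: the statement is the Claim_ definition above) =====
theorem countCommonBases_spec : Claim_equal_countCommonBases := by
  intro s1 s2 _
  unfold Spec_countCommonBases countCommonBases countCommonBases_alt
  rw [foldl_count]
  rw [filter_len_eq]
  simp
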